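-- pv_equiv track=rewrite | github.com/AnushkaMathur21/Library-Management-System | chart.py | count_member
-- ===== SOURCE A (Python) =====
-- def count_member(members):
--     ads=std=prf=0
--     for m in members:
--         if m=='Admin Staff':
--             ads+=1
--         elif m=='Student':
--             std+=1
--         elif m=='Professor':
--             prf+=1
--     member_count=[ads,std,prf]
--     return(member_count)
-- ===== SOURCE B (Python) =====
-- def count_member(members):
--     return [members.count(r) for r in ('Admin Staff', 'Student', 'Professor')]
-- ===== Notes on version B (the rewrite author's own statement) =====
-- stated objective: idiomatic
-- what changed: Replaces the single pass with three maintained counters and if/elif branching by three independent list.count passes, one per category, with no loop state at all.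
import Mathlib
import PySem

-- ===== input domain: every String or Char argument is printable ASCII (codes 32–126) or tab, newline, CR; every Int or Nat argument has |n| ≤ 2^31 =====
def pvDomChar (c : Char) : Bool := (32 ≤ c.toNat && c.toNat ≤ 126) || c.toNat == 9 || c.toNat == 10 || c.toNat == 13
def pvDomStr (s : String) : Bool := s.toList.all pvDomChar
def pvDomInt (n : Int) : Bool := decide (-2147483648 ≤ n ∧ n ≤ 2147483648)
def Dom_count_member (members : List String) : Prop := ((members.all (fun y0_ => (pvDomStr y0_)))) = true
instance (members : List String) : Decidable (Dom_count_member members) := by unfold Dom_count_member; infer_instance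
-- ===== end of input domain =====

-- B drops the stateful single pass with three counters and if/elif branching in favour of three independent list.count passes, one per category; idiomatic, same cost.

-- ===== PORT A =====
def count_member (members : List String) : List Int :=
  let st := members.foldl (fun (acc : Int × Int × Int) m =>
    if m = "Admin Staff" then (acc.1 + 1, acc.2.1, acc.2.2)
    else if m = "Student" then (acc.1, acc.2.1 + 1, acc.2.2)
    else if m = "Professor" then (acc.1, acc.2.1, acc.2.2 + 1)
    else acc) (0, 0, 0)
  [st.1, st.2.1, st.2.2]

-- ===== PORT B =====
def count_member_alt (members : List String) : List Int :=
  ["Admin Staff", "Student", "Professor"].map (fun r => PySem.List.count members r)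

-- ===== PRECONDITION & SPEC =====
def Spec_count_member (members : List String) (out : List Int) : Prop := out = count_member_alt members
instance (members : List String) (out : List Int) : Decidable (Spec_count_member members out) := by unfold Spec_count_member; infer_instance

-- ===== CLAIM =====
def Claim_equal_count_member : Prop := ∀ (members : List String), Dom_count_member members → Spec_count_member members (count_member members)

-- ===== LEMMAS AND PROOFS =====
theorem count_member_A_eq_counts (a s p : Int) (members : List String) :
    members.foldl (fun (acc : Int × Int × Int) m =>
      if m = "Admin Staff" then (acc.1 + 1, acc.2.1, acc.2.2)
      else if m = "Student" then (acc.1, acc.2.1 + 1, acc.2.2)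
      else if m = "Professor" then (acc.1, acc.2.1, acc.2.2 + 1)
      else acc) (a, s, p)
    = (a + members.count "Admin Staff", s + members.count "Student", p + members.count "Professor") := by
  induction members generalizing a s p with
  | nil => simp
  | cons x xs ih =>
    simp only [List.foldl_cons, List.count_cons]
    split_ifs with h1 h2 h3 <;> simp_all [ih] <;> ring_nf

-- ===== VERDICT =====
theorem count_member_spec : Claim_equal_count_member := by
  intro members _
  unfold Spec_count_member count_member count_member_alt
  simp [count_member_A_eq_counts, PySem.List.count_eq]
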